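-- pv_equiv track=rewrite | github.com/jumoc/NBA_Players | app.py | mapPlayers
-- ===== SOURCE A (Python) =====
-- def mapPlayers(playerList):
--     """Map the requested list of dicts to a new dict"""
--     heightsList = {}
--     for player in playerList['values']:
--         if heightsList.get(player.get('h_in')):
--             heightsList[player['h_in']].append(player)
--         else:
--             heightsList[player['h_in']] = [player]
--     return heightsList
-- ===== SOURCE B (Python) =====
-- def mapPlayers(playerList):
--     """Map the requested list of dicts to a new dict"""
--     players = playerList['values']
--     keys = list(dict.fromkeys(p['h_in'] for p in players))
--     return {k: [p for p in players if p['h_in'] == k] for k in keys}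
-- ===== Notes on version B (the rewrite author's own statement) =====
-- stated objective: alternative
-- what changed: Replaced the single-pass dict accumulation (get-then-append-or-create per player) by a two-phase plan: collect the distinct heights in first-occurrence order with dict.fromkeys, then build each group by filtering the player list once per height.
import Mathlib
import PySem

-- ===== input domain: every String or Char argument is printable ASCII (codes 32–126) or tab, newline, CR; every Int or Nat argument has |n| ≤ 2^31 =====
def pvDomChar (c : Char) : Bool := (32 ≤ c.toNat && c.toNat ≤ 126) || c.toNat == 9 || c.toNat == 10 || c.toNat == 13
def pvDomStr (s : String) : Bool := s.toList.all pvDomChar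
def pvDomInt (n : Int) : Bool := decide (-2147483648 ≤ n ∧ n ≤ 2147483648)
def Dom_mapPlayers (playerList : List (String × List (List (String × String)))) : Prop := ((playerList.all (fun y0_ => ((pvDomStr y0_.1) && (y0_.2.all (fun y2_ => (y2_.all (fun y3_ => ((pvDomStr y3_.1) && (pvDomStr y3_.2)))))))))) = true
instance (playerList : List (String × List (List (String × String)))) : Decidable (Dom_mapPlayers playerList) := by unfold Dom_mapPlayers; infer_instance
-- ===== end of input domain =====

-- B groups by first collecting the distinct heights in first-occurrence order and then filtering
-- the player list once per height, instead of A's single-pass dict accumulation ('alternative').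

-- ===== PORT A =====
-- loop body of A: check `heightsList.get(player.get('h_in'))` for truthiness (a missing 'h_in'
-- makes it falsy), then append to the existing group or start a new one.
def pvStep (d : PySem.Dict String (List (List (String × String)))) (player : List (String × String)) :
    PySem.Dict String (List (List (String × String))) :=
  let k? := List.lookup "h_in" player
  let truthy :=
    match k? with
    | some k =>
      match d.get? k with
      | some l => !l.isEmpty
      | none => false
    | none => false
  if truthy then
    d.modify (k?.getD "") [] (· ++ [player])   -- heightsList[player['h_in']].append(player); Pre_ makes k? some
  else
    d.insert (k?.getD "") [player]             -- heightsList[player['h_in']] = [player]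

def mapPlayers (playerList : List (String × List (List (String × String)))) : List (String × List (List (String × String))) :=
  let values := (List.lookup "values" playerList).getD []  -- playerList['values']; Pre_ guarantees the key
  (values.foldl pvStep PySem.Dict.empty).items

-- ===== PORT B =====
def pvKeyOf (p : List (String × String)) : String := (List.lookup "h_in" p).getD ""  -- p['h_in']; Pre_ guarantees the key

def mapPlayers_alt (playerList : List (String × List (List (String × String)))) : List (String × List (List (String × String))) :=
  let players := (List.lookup "values" playerList).getD []
  let keys := PySem.List.dedup (players.map pvKeyOf)       -- list(dict.fromkeys(...))
  keys.map (fun k => (k, players.filter (fun p => pvKeyOf p == k)))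

-- ===== PRECONDITION & SPEC =====
-- Pre_ excludes exactly the inputs where A raises KeyError: no 'values' key, or a player without 'h_in'.
def Pre_mapPlayers (playerList : List (String × List (List (String × String)))) : Prop :=
  (List.lookup "values" playerList).isSome = true ∧
  ∀ p ∈ (List.lookup "values" playerList).getD [], (List.lookup "h_in" p).isSome = true
instance (playerList : List (String × List (List (String × String)))) : Decidable (Pre_mapPlayers playerList) := by
  unfold Pre_mapPlayers; infer_instance

def pvWitness_mapPlayers : (List (String × List (List (String × String)))) :=
  [("values", [[("h_in", "75"), ("name", "al")], [("h_in", "80")], [("h_in", "75"), ("name", "bo")]])]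

def Spec_mapPlayers (playerList : List (String × List (List (String × String)))) (out : List (String × List (List (String × String)))) : Prop := out = mapPlayers_alt playerList
instance (playerList : List (String × List (List (String × String)))) (out : List (String × List (List (String × String)))) : Decidable (Spec_mapPlayers playerList out) := by unfold Spec_mapPlayers; infer_instance

-- ===== CLAIM (what is proved, stated in full; the proofs are below) =====
def Claim_equal_mapPlayers : Prop := ∀ (playerList : List (String × List (List (String × String)))), Dom_mapPlayers playerList → Pre_mapPlayers playerList → Spec_mapPlayers playerList (mapPlayers playerList)

-- ===== LEMMAS AND PROOFS =====


lemma dedup_append_singleton (xs : List String) (x : String) :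
    PySem.List.dedup (xs ++ [x]) =
      if x ∈ xs then PySem.List.dedup xs else PySem.List.dedup xs ++ [x] := by
  have : PySem.List.dedup (xs ++ [x]) = PySem.Set.add (PySem.List.dedup xs) x := by
    simp [PySem.List.dedup, PySem.Set.ofList, List.foldl_append]
  rw [this, PySem.Set.add]
  by_cases hx : x ∈ xs
  · simp [hx, List.contains_eq_mem]
  · simp [hx, List.contains_eq_mem]

lemma fold_items (l : List (List (String × String)))
    (h : ∀ p ∈ l, (List.lookup "h_in" p).isSome = true) :
    (l.foldl pvStep PySem.Dict.empty).items
      = (PySem.List.dedup (l.map pvKeyOf)).map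
          (fun k => (k, l.filter (fun p => pvKeyOf p == k))) := by
  induction l using List.reverseRecOn with
  | nil => rfl
  | append_singleton l p ih =>
    have hl : ∀ q ∈ l, (List.lookup "h_in" q).isSome = true := fun q hq => h q (by simp [hq])
    have hp : (List.lookup "h_in" p).isSome = true := h p (by simp)
    obtain ⟨k, hk⟩ := Option.isSome_iff_exists.mp hp
    have ih' := ih hl
    have hkp : pvKeyOf p = k := by simp [pvKeyOf, hk]
    rw [List.foldl_append, List.foldl_cons, List.foldl_nil]
    set d := l.foldl pvStep PySem.Dict.empty with hd
    have hkeys : d.keys = PySem.List.dedup (l.map pvKeyOf) := by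
      simp [PySem.Dict.keys, ih', List.map_map, Function.comp_def]
    have hnd : d.keys.Nodup := hkeys ▸ PySem.List.nodup_dedup _
    have hmapk : (l ++ [p]).map pvKeyOf = l.map pvKeyOf ++ [k] := by
      simp [hkp]
    by_cases hmem : k ∈ l.map pvKeyOf
    · -- existing group: truthy, append
      have hitem : (k, l.filter (fun q => pvKeyOf q == k)) ∈ d.items := by
        rw [ih']
        exact List.mem_map_of_mem ((PySem.List.mem_dedup _ _).mpr hmem)
      have hget : d.get? k = some (l.filter (fun q => pvKeyOf q == k)) :=
        PySem.Dict.get?_of_mem_items d hitem hnd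
      obtain ⟨q, hq, hqk⟩ := List.mem_map.mp hmem
      have hne : l.filter (fun q => pvKeyOf q == k) ≠ [] := by
        intro h0
        have hmemf : q ∈ l.filter (fun q => pvKeyOf q == k) :=
          List.mem_filter.mpr ⟨hq, by simp [hqk]⟩
        rw [h0] at hmemf; simp at hmemf
      have hgetD : d.getD k [] = l.filter (fun q => pvKeyOf q == k) :=
        PySem.Dict.getD_of_mem_items d hitem hnd []
      have hcont : d.contains k = true := by
        rw [PySem.Dict.contains_eq_decide_mem_keys, hkeys]
        simp only [PySem.List.mem_dedup, decide_eq_true_eq]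
        exact hmem
      have hstep : pvStep d p = d.insert k (l.filter (fun q => pvKeyOf q == k) ++ [p]) := by
        simp only [pvStep, hk, hget, PySem.Dict.modify, hgetD, Option.getD_some]
        rw [if_pos (by simpa using hne)]
      rw [hstep, PySem.Dict.items_insert_of_contains d _ hcont, ih', hmapk,
        dedup_append_singleton _ _, if_pos hmem, List.map_map]
      refine List.map_congr_left ?_
      intro kk hkk
      by_cases hkkk : kk = k
      · subst hkkk
        simp [List.filter_append, hkp]
      · simp [Function.comp, hkkk, List.filter_append, hkp, Ne.symm hkkk]
    · -- new group: falsy, insert fresh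
      have hget : d.get? k = none := by
        rw [PySem.Dict.get?_eq_none_iff_not_mem_keys, hkeys, PySem.List.mem_dedup]
        exact hmem
      have hcont : d.contains k = false := by
        rw [PySem.Dict.contains_eq_decide_mem_keys, hkeys]
        simp only [PySem.List.mem_dedup, decide_eq_false_iff_not]
        exact hmem
      have hstep : pvStep d p = d.insert k [p] := by
        simp only [pvStep, hk, hget, Bool.false_eq_true, if_false, Option.getD_some]
      have hfilt : l.filter (fun q => pvKeyOf q == k) = [] := by
        refine List.filter_eq_nil_iff.mpr ?_
        intro q hq
        simp only [beq_iff_eq]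
        intro hqk
        exact hmem (hqk ▸ List.mem_map_of_mem hq)
      rw [hstep, PySem.Dict.items_insert_of_not_contains d _ hcont, ih', hmapk,
        dedup_append_singleton _ _, if_neg hmem, List.map_append]
      congr 1
      · refine List.map_congr_left ?_
        intro kk hkk
        have hkkk : kk ≠ k := by
          intro h; subst h
          exact hmem ((PySem.List.mem_dedup _ _).mp hkk)
        simp [List.filter_append, hkp, Ne.symm hkkk]
      · simp [List.filter_append, hfilt, hkp]

-- ===== VERDICT (by name: the statement is the Claim_ definition above) =====
theorem mapPlayers_spec : Claim_equal_mapPlayers := by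
  intro playerList _ hpre
  unfold Spec_mapPlayers mapPlayers mapPlayers_alt
  exact fold_items _ hpre.2
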